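-- pv_equiv track=rewrite | github.com/SatishoBananamoto/svx | src/svx/parser.py | _tee_segment_targets
-- ===== SOURCE A (Python) =====
-- WRITE_REDIRECT_OPERATORS = {">", ">>", ">|", "&>"}
--
-- CONTROL_TOKENS = {"|", "&&", "||", ";"}
--
-- def _tee_segment_targets(segment: list[str]) -> list[str]:
--     targets = []
--     end_of_options = False
--     for token in segment[1:]:
--         if token == "--":
--             end_of_options = True
--             continue
--         if not end_of_options and token.startswith("-"):
--             continue
--         if token in WRITE_REDIRECT_OPERATORS or token in CONTROL_TOKENS:
--             continue
--         if _looks_like_file_target(token):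
--             targets.append(token)
--     return targets
--
-- def _looks_like_file_target(token: str) -> bool:
--     if not token:
--         return False
--     if token in CONTROL_TOKENS:
--         return False
--     if token in WRITE_REDIRECT_OPERATORS or token in {"<", "<<", "<<<"}:
--         return False
--     if token.startswith("&"):
--         return False
--     return True
-- ===== SOURCE B (Python) =====
-- WRITE_REDIRECT_OPERATORS = {">", ">>", ">|", "&>"}
--
-- CONTROL_TOKENS = {"|", "&&", "||", ";"}
--
-- def _looks_like_file_target(token: str) -> bool:
--     if not token:
--         return False
--     if token in CONTROL_TOKENS:
--         return False
--     if token in WRITE_REDIRECT_OPERATORS or token in {"<", "<<", "<<<"}: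
--         return False
--     if token.startswith("&"):
--         return False
--     return True
--
-- def _tee_segment_targets(segment: list[str]) -> list[str]:
--     rest = segment[1:]
--     try:
--         i = rest.index("--")
--         pre, post = rest[:i], rest[i + 1:]
--     except ValueError:
--         pre, post = rest, []
--     head = [t for t in pre if not t.startswith("-") and _looks_like_file_target(t)]
--     tail = [t for t in post if t != "--" and _looks_like_file_target(t)]
--     return head + tail
-- ===== Notes on version B (the rewrite author's own statement) =====
-- stated objective: simpler
-- what changed: Replaces the end_of_options flag threaded through a single loop with a split at the first '--' followed by two plain filters (options region: drop '-'-prefixed tokens; operand region: drop further '--' tokens), concatenated in order.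
import Mathlib
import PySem

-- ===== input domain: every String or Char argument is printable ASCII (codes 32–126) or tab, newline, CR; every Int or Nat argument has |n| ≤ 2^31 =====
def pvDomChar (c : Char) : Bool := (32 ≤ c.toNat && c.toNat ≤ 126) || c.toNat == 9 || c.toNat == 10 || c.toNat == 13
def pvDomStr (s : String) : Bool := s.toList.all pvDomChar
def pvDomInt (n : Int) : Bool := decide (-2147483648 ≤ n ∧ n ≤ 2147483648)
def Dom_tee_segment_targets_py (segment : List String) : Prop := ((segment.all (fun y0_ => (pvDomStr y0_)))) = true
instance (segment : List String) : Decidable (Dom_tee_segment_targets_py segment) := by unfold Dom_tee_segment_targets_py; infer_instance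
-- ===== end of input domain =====

-- B replaces A's end_of_options flag loop with a split at the first "--" and two plain filters (simpler decomposition, same O(n) cost).

-- ===== PORT A =====
-- helper _looks_like_file_target, transliterated (shared by both ports, as in the Python module)
def looksLikeFileTarget (token : String) : Bool :=
  if token = "" then false
  else if token = "|" ∨ token = "&&" ∨ token = "||" ∨ token = ";" then false
  else if (token = ">" ∨ token = ">>" ∨ token = ">|" ∨ token = "&>") ∨ (token = "<" ∨ token = "<<" ∨ token = "<<<") then false
  else if PySem.Str.startswith token "&" then false
  else true

-- the loop body of A (targets, end_of_options)
def teeStepA (st : List String × Bool) (token : String) : List String × Bool :=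
  if token = "--" then (st.1, true)
  else if !st.2 && PySem.Str.startswith token "-" then st
  else if (token = ">" ∨ token = ">>" ∨ token = ">|" ∨ token = "&>") ∨ (token = "|" ∨ token = "&&" ∨ token = "||" ∨ token = ";") then st
  else if looksLikeFileTarget token then (st.1 ++ [token], st.2)
  else st

def tee_segment_targets_py (segment : List String) : List String :=
  ((PySem.List.slice segment (some 1) none).foldl teeStepA ([], false)).1

-- ===== PORT B =====
-- rest[:i] / rest[i+1:] with i a nonnegative list index are exactly take/drop (PySem.List.slice_natCast)
def tee_segment_targets_py_alt (segment : List String) : List String :=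
  let rest := PySem.List.slice segment (some 1) none
  let (pre, post) :=
    match PySem.List.index? rest "--" with
    | some i => (rest.take i, rest.drop (i + 1))
    | none => (rest, ([] : List String))
  pre.filter (fun t => !PySem.Str.startswith t "-" && looksLikeFileTarget t)
    ++ post.filter (fun t => !(t == "--") && looksLikeFileTarget t)

-- ===== PRECONDITION & SPEC =====
def Spec_tee_segment_targets_py (segment : List String) (out : List String) : Prop := out = tee_segment_targets_py_alt segment
instance (segment : List String) (out : List String) : Decidable (Spec_tee_segment_targets_py segment out) := by unfold Spec_tee_segment_targets_py; infer_instance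

-- ===== CLAIM (what is proved, stated in full; the proofs are below) =====
def Claim_equal_tee_segment_targets_py : Prop := ∀ (segment : List String), Dom_tee_segment_targets_py segment → Spec_tee_segment_targets_py segment (tee_segment_targets_py segment)

-- ===== LEMMAS AND PROOFS =====

-- every operator token that A's membership test skips is already rejected by _looks_like_file_target
lemma looks_false_of_op (t : String)
    (h : (t = ">" ∨ t = ">>" ∨ t = ">|" ∨ t = "&>") ∨ (t = "|" ∨ t = "&&" ∨ t = "||" ∨ t = ";")) :
    looksLikeFileTarget t = false := by
  rcases h with (h|h|h|h)|(h|h|h|h) <;> subst h <;> decide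

-- after end_of_options is set, A's loop keeps exactly the non-"--" tokens passing _looks_like_file_target
lemma foldl_teeStepA_true (l : List String) : ∀ acc : List String,
    (l.foldl teeStepA (acc, true)).1 = acc ++ l.filter (fun t => !(t == "--") && looksLikeFileTarget t) := by
  induction l with
  | nil => intro acc; simp
  | cons t l ih =>
    intro acc
    by_cases h1 : t = "--"
    · subst h1
      simp [teeStepA, ih]
    · by_cases h2 : (t = ">" ∨ t = ">>" ∨ t = ">|" ∨ t = "&>") ∨ (t = "|" ∨ t = "&&" ∨ t = "||" ∨ t = ";")
      · simp [teeStepA, h1, h2, looks_false_of_op t h2, ih]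
      · by_cases h3 : looksLikeFileTarget t = true
        · simp [teeStepA, h1, h2, h3, ih]
        · simp [teeStepA, h1, h2, Bool.eq_false_iff.mpr h3, ih]

-- before end_of_options, A's loop computes B's split-and-filter value
set_option maxRecDepth 8192 in
lemma foldl_teeStepA_false (l : List String) : ∀ acc : List String,
    (l.foldl teeStepA (acc, false)).1 =
      acc ++ ((match PySem.List.index? l "--" with
               | some i => (l.take i, l.drop (i + 1))
               | none => (l, ([] : List String))).1.filter
                 (fun t => !PySem.Str.startswith t "-" && looksLikeFileTarget t)
             ++ (match PySem.List.index? l "--" with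
                 | some i => (l.take i, l.drop (i + 1))
                 | none => (l, ([] : List String))).2.filter
                   (fun t => !(t == "--") && looksLikeFileTarget t)) := by
  induction l with
  | nil => intro acc; simp [PySem.List.index?]
  | cons t l ih =>
    intro acc
    by_cases h1 : t = "--"
    · subst h1
      rw [PySem.List.index?_cons_self]
      simp [teeStepA, foldl_teeStepA_true]
    · rw [PySem.List.index?_cons_of_ne l h1]
      have hstep : ∀ keep : Bool,
          teeStepA (acc, false) t = ((if keep then acc ++ [t] else acc), false) →
          (keep = (!PySem.Str.startswith t "-" && looksLikeFileTarget t)) →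
          ((t :: l).foldl teeStepA (acc, false)).1 =
            acc ++ ((match (PySem.List.index? l "--").map (· + 1) with
                     | some i => ((t :: l).take i, (t :: l).drop (i + 1))
                     | none => (t :: l, ([] : List String))).1.filter
                       (fun t => !PySem.Str.startswith t "-" && looksLikeFileTarget t)
                   ++ (match (PySem.List.index? l "--").map (· + 1) with
                       | some i => ((t :: l).take i, (t :: l).drop (i + 1))
                       | none => (t :: l, ([] : List String))).2.filter
                         (fun t => !(t == "--") && looksLikeFileTarget t)) := by
        intro keep hs hk
        rw [List.foldl_cons, hs]
        cases hio : PySem.List.index? l "--" with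
        | none =>
          simp only [Option.map_none]
          cases keep with
          | false =>
            rw [if_neg (by simp), ih acc, hio]
            simp only [List.filter_cons, ← hk]
            simp
          | true =>
            rw [if_pos rfl, ih (acc ++ [t]), hio]
            simp only [List.filter_cons, ← hk]
            simp
        | some i =>
          simp only [Option.map_some]
          cases keep with
          | false =>
            rw [if_neg (by simp), ih acc, hio]
            simp only [List.take_succ_cons, List.drop_succ_cons, List.filter_cons, ← hk]
            simp
          | true =>
            rw [if_pos rfl, ih (acc ++ [t]), hio]
            simp only [List.take_succ_cons, List.drop_succ_cons, List.filter_cons, ← hk]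
            simp
      by_cases hs : PySem.Chars.startswith t.toList ['-'] = true
      · exact hstep false (by simp [teeStepA, h1, hs]) (by simp [hs])
      · by_cases h2 : (t = ">" ∨ t = ">>" ∨ t = ">|" ∨ t = "&>") ∨ (t = "|" ∨ t = "&&" ∨ t = "||" ∨ t = ";")
        · exact hstep false (by simp [teeStepA, h1, hs, h2]) (by rw [looks_false_of_op t h2]; simp)
        · by_cases h3 : looksLikeFileTarget t = true
          · exact hstep true (by simp [teeStepA, h1, hs, h2, h3]) (by simp [hs, h3])
          · exact hstep false (by simp [teeStepA, h1, hs, h2, Bool.eq_false_iff.mpr h3])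
              (by simp [Bool.eq_false_iff.mpr h3])

-- ===== VERDICT (by name: the statement is the Claim_ definition above) =====
theorem tee_segment_targets_py_spec : Claim_equal_tee_segment_targets_py := by
  intro segment _
  unfold Spec_tee_segment_targets_py tee_segment_targets_py tee_segment_targets_py_alt
  rw [foldl_teeStepA_false]
  simp
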